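-- pv_equiv track=rewrite | github.com/watermelon-nakatake/md_site_maker | multiple_article/make_new_article.py | replace_code_to_md
-- ===== SOURCE A (Python) =====
-- def replace_code_to_md(md_str, subject_sex):
--     if subject_sex == 'man':
--         replace_list = [['%rp', '%r_palm%\n'], ['%r?', '%r_?%\n'], ['%r!', '%r_!%\n'], ['%l!', '%l_!%\n']]
--     else:
--         replace_list = [['%rp', '%rw_palm%\n'], ['%r?', '%rw_?%\n'], ['%r!', '%rw_!%\n'], ['%l!', '%l_!%\n']]
--     for r_list in replace_list:
--         md_str = md_str.replace(r_list[0], r_list[1])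
--     return md_str
-- ===== SOURCE B (Python) =====
-- def replace_code_to_md(md_str, subject_sex):
--     if subject_sex == 'man':
--         table = {'%rp': '%r_palm%\n', '%r?': '%r_?%\n', '%r!': '%r_!%\n', '%l!': '%l_!%\n'}
--     else:
--         table = {'%rp': '%rw_palm%\n', '%r?': '%rw_?%\n', '%r!': '%rw_!%\n', '%l!': '%l_!%\n'}
--     out = []
--     i = 0
--     n = len(md_str)
--     while i < n:
--         rep = table.get(md_str[i:i + 3])
--         if rep is not None:
--             out.append(rep)
--             i += 3
--         else:
--             out.append(md_str[i])
--             i += 1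
--     return ''.join(out)
-- ===== Notes on version B (the rewrite author's own statement) =====
-- stated objective: alternative
-- what changed: A makes four sequential str.replace passes over the string; B builds one token-to-replacement dict per sex and does a single left-to-right scan, looking up each 3-char window and emitting the replacement or the current character.
import Mathlib
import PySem

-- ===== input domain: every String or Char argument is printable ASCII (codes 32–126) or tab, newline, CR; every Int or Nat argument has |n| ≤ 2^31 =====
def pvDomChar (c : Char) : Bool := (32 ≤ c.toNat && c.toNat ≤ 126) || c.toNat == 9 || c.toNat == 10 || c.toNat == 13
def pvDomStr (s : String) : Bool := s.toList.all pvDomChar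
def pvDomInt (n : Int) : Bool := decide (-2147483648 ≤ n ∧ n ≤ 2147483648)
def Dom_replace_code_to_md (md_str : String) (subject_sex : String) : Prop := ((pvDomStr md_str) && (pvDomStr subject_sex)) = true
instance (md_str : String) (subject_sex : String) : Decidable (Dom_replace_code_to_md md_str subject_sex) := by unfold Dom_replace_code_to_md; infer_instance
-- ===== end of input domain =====

-- B replaces A's four sequential str.replace passes by a single left-to-right scan driven by a
-- token → replacement dictionary (one pass over the string instead of four); same return value, no side effects.

-- ===== PORT A =====
def replace_code_to_md (md_str : String) (subject_sex : String) : String :=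
  let replace_list : List (String × String) :=
    if subject_sex == "man" then
      [("%rp", "%r_palm%\n"), ("%r?", "%r_?%\n"), ("%r!", "%r_!%\n"), ("%l!", "%l_!%\n")]
    else
      [("%rp", "%rw_palm%\n"), ("%r?", "%rw_?%\n"), ("%r!", "%rw_!%\n"), ("%l!", "%l_!%\n")]
  replace_list.foldl (fun s r => PySem.Str.replace s r.1 r.2) md_str


-- ===== PORT B =====
-- B-side helper: the single left-to-right scan of Source B's while loop (3-char window looked up in the dict)
def altGo (table : PySem.Dict String String) : List Char → List Char
  | [] => []
  | c :: t =>
    match table.get? (String.ofList ((c :: t).take 3)) with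
    | some rep => rep.toList ++ altGo table (t.drop 2)
    | none => c :: altGo table t
  termination_by l => l.length
  decreasing_by
  · simp only [List.length_cons, List.length_drop]; omega
  · simp only [List.length_cons]; omega


def replace_code_to_md_alt (md_str : String) (subject_sex : String) : String :=
  let table : PySem.Dict String String :=
    if subject_sex == "man" then
      PySem.Dict.ofList [("%rp", "%r_palm%\n"), ("%r?", "%r_?%\n"), ("%r!", "%r_!%\n"), ("%l!", "%l_!%\n")]
    else
      PySem.Dict.ofList [("%rp", "%rw_palm%\n"), ("%r?", "%rw_?%\n"), ("%r!", "%rw_!%\n"), ("%l!", "%l_!%\n")]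
  String.ofList (altGo table md_str.toList)


-- ===== PRECONDITION & SPEC =====
def Spec_replace_code_to_md (md_str : String) (subject_sex : String) (out : String) : Prop := out = replace_code_to_md_alt md_str subject_sex
instance (md_str : String) (subject_sex : String) (out : String) : Decidable (Spec_replace_code_to_md md_str subject_sex out) := by unfold Spec_replace_code_to_md; infer_instance

-- ===== CLAIM (what is proved, stated in full; the proofs are below) =====
def Claim_equal_replace_code_to_md : Prop := ∀ (md_str : String) (subject_sex : String), Dom_replace_code_to_md md_str subject_sex → Spec_replace_code_to_md md_str subject_sex (replace_code_to_md md_str subject_sex)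

-- ===== LEMMAS AND PROOFS =====
-- repc is a fuel-free restatement of PySem.Chars.replace for a nonempty pattern (go_eq_repc);
-- chain_eq is the heart: four sequential repc passes equal B's one-pass scan, because the four
-- 3-char tokens all start with '%' and never overlap each other or the replacement texts.
def repc (o1 : Char) (os new : List Char) : List Char → List Char
  | [] => []
  | c :: t => if (o1 :: os).isPrefixOf (c :: t) then new ++ repc o1 os new (t.drop os.length)
              else c :: repc o1 os new t
  termination_by l => l.length
  decreasing_by
  · simp only [List.length_cons, List.length_drop]; omega
  · simp only [List.length_cons]; omega


theorem go_eq_repc (o1 : Char) (os new : List Char) :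
    ∀ (fuel : Nat) (l acc : List Char), l.length ≤ fuel →
      PySem.Chars.replace.go (o1 :: os) new fuel l acc = acc.reverse ++ repc o1 os new l := by
  intro fuel
  induction fuel with
  | zero => intro l acc h
            have : l = [] := by cases l <;> simp_all
            subst this; simp [PySem.Chars.replace.go, repc]
  | succ n ih =>
      intro l acc h
      cases l with
      | nil => simp [PySem.Chars.replace.go, repc]
      | cons c t =>
        rw [PySem.Chars.replace.go]
        by_cases hp : (o1 :: os).isPrefixOf (c :: t)
        · rw [if_pos hp]
          rw [show List.drop (o1 :: os).length (c :: t) = t.drop os.length by simp]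
          rw [ih _ _ (by simp at h ⊢; omega)]
          rw [repc, if_pos hp]
          simp
        · rw [if_neg hp]
          rw [ih t (c :: acc) (by simp at h ⊢; omega)]
          simp only [List.reverse_cons, List.append_assoc, List.singleton_append]
          conv_rhs => rw [repc]
          rw [if_neg hp]


theorem replace_eq_repc (o1 : Char) (os new l : List Char) :
    PySem.Chars.replace l (o1 :: os) new = repc o1 os new l := by
  rw [PySem.Chars.replace]
  simp only [List.isEmpty_cons, if_false, Bool.false_eq_true]
  rw [go_eq_repc o1 os new l.length l [] le_rfl]
  simp


def safeB (old l : List Char) : Bool :=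
  if old.length ≤ l.length then !(old.isPrefixOf l) else !(l.isPrefixOf old)


theorem not_prefix_append {old l : List Char} (h : safeB old l = true) (X : List Char) :
    old.isPrefixOf (l ++ X) = false := by
  rw [Bool.eq_false_iff]
  intro hc
  rw [List.isPrefixOf_iff_prefix] at hc
  unfold safeB at h
  split_ifs at h with hlen
  · rw [List.prefix_iff_eq_take] at hc
    rw [List.take_append_of_le_length hlen] at hc
    have hpl : old <+: l := hc ▸ List.take_prefix _ _
    simp only [Bool.not_eq_eq_eq_not, Bool.not_true] at h
    rw [Bool.eq_false_iff] at h
    exact h ((List.isPrefixOf_iff_prefix).2 hpl)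
  · have hpl : l <+: old :=
      List.prefix_of_prefix_length_le (List.prefix_append l X) hc (by omega)
    simp only [Bool.not_eq_eq_eq_not, Bool.not_true] at h
    rw [Bool.eq_false_iff] at h
    exact h ((List.isPrefixOf_iff_prefix).2 hpl)


def Clean (old p : List Char) : Prop := ∀ s ∈ p.tails, s ≠ [] → safeB old s = true



theorem repc_append_clean (o1 : Char) (os new : List Char) :
    ∀ (p : List Char), Clean (o1 :: os) p →
      ∀ X, repc o1 os new (p ++ X) = p ++ repc o1 os new X := by
  intro p
  induction p with
  | nil => intro _ X; simp
  | cons c p' ih =>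
      intro hcl X
      have hsafe : safeB (o1 :: os) (c :: p') = true :=
        hcl (c :: p') ((List.mem_tails _ _).2 (List.suffix_refl _)) (by simp)
      have hnp := not_prefix_append hsafe X
      rw [List.cons_append, repc, if_neg (by simp only [← List.cons_append, hnp]; simp)]
      rw [ih (fun s hs hne => hcl s ((List.mem_tails _ _).2
            (((List.mem_tails _ _).1 hs).trans (List.suffix_cons c p'))) hne) X]
      simp


theorem repc_key (o1 : Char) (os new t : List Char) :
    repc o1 os new ((o1 :: os) ++ t) = new ++ repc o1 os new t := by
  rw [List.cons_append, repc,
    if_pos ((List.isPrefixOf_iff_prefix).2 (by rw [← List.cons_append]; exact List.prefix_append _ _)),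
    List.drop_left]

theorem repc_neg (o1 : Char) (os new : List Char) {c : Char} {t : List Char}
    (h : (o1 :: os).isPrefixOf (c :: t) = false) :
    repc o1 os new (c :: t) = c :: repc o1 os new t := by
  rw [repc, if_neg (by simp [h])]

theorem repc_take1 (o1 o2 o3 : Char) (ns l : List Char) :
    (repc o1 [o2, o3] (o1 :: o2 :: ns) l).take 1 = l.take 1 := by
  cases l with
  | nil => simp [repc]
  | cons c t =>
      by_cases h : ([o1, o2, o3] : List Char).isPrefixOf (c :: t)
      · have hp := (List.isPrefixOf_iff_prefix).1 h
        obtain ⟨u, hu⟩ := hp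
        rw [repc, if_pos h]
        simp at hu
        rw [← hu.1]
        simp
      · rw [repc_neg _ _ _ (Bool.eq_false_iff.2 h)]
        simp

theorem repc_take2 (o1 o2 o3 : Char) (ns l : List Char) :
    (repc o1 [o2, o3] (o1 :: o2 :: ns) l).take 2 = l.take 2 := by
  cases l with
  | nil => simp [repc]
  | cons c t =>
      by_cases h : ([o1, o2, o3] : List Char).isPrefixOf (c :: t)
      · have hp := (List.isPrefixOf_iff_prefix).1 h
        obtain ⟨u, hu⟩ := hp
        rw [repc, if_pos h]
        simp at hu
        obtain ⟨rfl, htu⟩ := hu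
        rw [← htu]
        simp
      · rw [repc_neg _ _ _ (Bool.eq_false_iff.2 h)]
        rw [List.take_succ_cons, List.take_succ_cons, repc_take1]

theorem prefix3_congr (x y z c : Char) {X Y : List Char} (h : X.take 2 = Y.take 2) :
    ([x, y, z] : List Char).isPrefixOf (c :: X) = ([x, y, z] : List Char).isPrefixOf (c :: Y) := by
  rw [Bool.eq_iff_iff, List.isPrefixOf_iff_prefix, List.isPrefixOf_iff_prefix,
    List.prefix_iff_eq_take, List.prefix_iff_eq_take]
  simp [h]


theorem key_ne (x y z c : Char) (t : List Char)
    (h : ([x, y, z] : List Char).isPrefixOf (c :: t) = false) :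
    String.ofList ((c :: t).take 3) ≠ String.ofList [x, y, z] := by
  intro heq
  have h3 := congrArg String.toList heq
  simp only [String.toList_ofList] at h3
  have hpf : ([x, y, z] : List Char) <+: c :: t := List.prefix_iff_eq_take.2 (by simp [h3])
  rw [Bool.eq_false_iff] at h
  exact h ((List.isPrefixOf_iff_prefix).2 hpf)


theorem chain_eq (tbl : PySem.Dict String String) (rs1 rs2 rs3 rs4 : List Char)
    (h1 : tbl.get? "%rp" = some (String.ofList ('%' :: 'r' :: rs1)))
    (h2 : tbl.get? "%r?" = some (String.ofList ('%' :: 'r' :: rs2)))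
    (h3 : tbl.get? "%r!" = some (String.ofList ('%' :: 'r' :: rs3)))
    (h4 : tbl.get? "%l!" = some (String.ofList ('%' :: 'l' :: rs4)))
    (hnone : ∀ s : String, s ≠ "%rp" → s ≠ "%r?" → s ≠ "%r!" → s ≠ "%l!" → tbl.get? s = none)
    (c21 : Clean ['%', 'r', '?'] ('%' :: 'r' :: rs1))
    (c31 : Clean ['%', 'r', '!'] ('%' :: 'r' :: rs1))
    (c41 : Clean ['%', 'l', '!'] ('%' :: 'r' :: rs1))
    (c32 : Clean ['%', 'r', '!'] ('%' :: 'r' :: rs2))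
    (c42 : Clean ['%', 'l', '!'] ('%' :: 'r' :: rs2))
    (c43 : Clean ['%', 'l', '!'] ('%' :: 'r' :: rs3))
    (l : List Char) :
    repc '%' ['l', '!'] ('%' :: 'l' :: rs4)
      (repc '%' ['r', '!'] ('%' :: 'r' :: rs3)
        (repc '%' ['r', '?'] ('%' :: 'r' :: rs2)
          (repc '%' ['r', 'p'] ('%' :: 'r' :: rs1) l))) = altGo tbl l := by
  by_cases hp1 : (['%', 'r', 'p'] : List Char).isPrefixOf l = true
  · obtain ⟨t, ht⟩ := (List.isPrefixOf_iff_prefix).1 hp1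
    have hlt : t.length < l.length := by rw [← ht]; simp only [List.length_append, List.length_cons]; omega
    rw [← ht]
    rw [repc_key '%' ['r', 'p'] ('%' :: 'r' :: rs1) t]
    rw [repc_append_clean '%' ['r', '?'] _ _ c21]
    rw [repc_append_clean '%' ['r', '!'] _ _ c31]
    rw [repc_append_clean '%' ['l', '!'] _ _ c41]
    have hrhs : altGo tbl (['%', 'r', 'p'] ++ t) = ('%' :: 'r' :: rs1) ++ altGo tbl t := by
      show altGo tbl ('%' :: 'r' :: 'p' :: t) = _
      rw [altGo]
      simp only [List.take_succ_cons, List.take_zero, List.drop_succ_cons, List.drop_zero]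
      rw [h1]
      simp [String.toList_ofList]
    rw [hrhs, chain_eq tbl rs1 rs2 rs3 rs4 h1 h2 h3 h4 hnone c21 c31 c41 c32 c42 c43 t]
  · by_cases hp2 : (['%', 'r', '?'] : List Char).isPrefixOf l = true
    · obtain ⟨t, ht⟩ := (List.isPrefixOf_iff_prefix).1 hp2
      have hlt : t.length < l.length := by
        rw [← ht]; simp only [List.length_append, List.length_cons]; omega
      rw [← ht]
      rw [repc_append_clean '%' ['r', 'p'] _ ['%', 'r', '?'] (by unfold Clean; decide) t]
      rw [repc_key '%' ['r', '?'] ('%' :: 'r' :: rs2)]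
      rw [repc_append_clean '%' ['r', '!'] _ _ c32]
      rw [repc_append_clean '%' ['l', '!'] _ _ c42]
      have hrhs : altGo tbl (['%', 'r', '?'] ++ t) = ('%' :: 'r' :: rs2) ++ altGo tbl t := by
        show altGo tbl ('%' :: 'r' :: '?' :: t) = _
        rw [altGo]
        simp only [List.take_succ_cons, List.take_zero, List.drop_succ_cons, List.drop_zero]
        rw [h2]
        simp [String.toList_ofList]
      rw [hrhs, chain_eq tbl rs1 rs2 rs3 rs4 h1 h2 h3 h4 hnone c21 c31 c41 c32 c42 c43 t]
    · by_cases hp3 : (['%', 'r', '!'] : List Char).isPrefixOf l = true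
      · obtain ⟨t, ht⟩ := (List.isPrefixOf_iff_prefix).1 hp3
        have hlt : t.length < l.length := by
          rw [← ht]; simp only [List.length_append, List.length_cons]; omega
        rw [← ht]
        rw [repc_append_clean '%' ['r', 'p'] _ ['%', 'r', '!'] (by unfold Clean; decide) t]
        rw [repc_append_clean '%' ['r', '?'] _ ['%', 'r', '!'] (by unfold Clean; decide)]
        rw [repc_key '%' ['r', '!'] ('%' :: 'r' :: rs3)]
        rw [repc_append_clean '%' ['l', '!'] _ _ c43]
        have hrhs : altGo tbl (['%', 'r', '!'] ++ t) = ('%' :: 'r' :: rs3) ++ altGo tbl t := by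
          show altGo tbl ('%' :: 'r' :: '!' :: t) = _
          rw [altGo]
          simp only [List.take_succ_cons, List.take_zero, List.drop_succ_cons, List.drop_zero]
          rw [h3]
          simp [String.toList_ofList]
        rw [hrhs, chain_eq tbl rs1 rs2 rs3 rs4 h1 h2 h3 h4 hnone c21 c31 c41 c32 c42 c43 t]
      · by_cases hp4 : (['%', 'l', '!'] : List Char).isPrefixOf l = true
        · obtain ⟨t, ht⟩ := (List.isPrefixOf_iff_prefix).1 hp4
          have hlt : t.length < l.length := by
            rw [← ht]; simp only [List.length_append, List.length_cons]; omega
          rw [← ht]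
          rw [repc_append_clean '%' ['r', 'p'] _ ['%', 'l', '!'] (by unfold Clean; decide) t]
          rw [repc_append_clean '%' ['r', '?'] _ ['%', 'l', '!'] (by unfold Clean; decide)]
          rw [repc_append_clean '%' ['r', '!'] _ ['%', 'l', '!'] (by unfold Clean; decide)]
          rw [repc_key '%' ['l', '!'] ('%' :: 'l' :: rs4)]
          have hrhs : altGo tbl (['%', 'l', '!'] ++ t) = ('%' :: 'l' :: rs4) ++ altGo tbl t := by
            show altGo tbl ('%' :: 'l' :: '!' :: t) = _
            rw [altGo]
            simp only [List.take_succ_cons, List.take_zero, List.drop_succ_cons, List.drop_zero]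
            rw [h4]
            simp [String.toList_ofList]
          rw [hrhs, chain_eq tbl rs1 rs2 rs3 rs4 h1 h2 h3 h4 hnone c21 c31 c41 c32 c42 c43 t]
        · cases l with
          | nil => simp [repc, altGo]
          | cons c t =>
            have hlt : t.length < (c :: t).length := by simp
            have hp1f := Bool.eq_false_iff.2 hp1
            have hp2f := Bool.eq_false_iff.2 hp2
            have hp3f := Bool.eq_false_iff.2 hp3
            have hp4f := Bool.eq_false_iff.2 hp4
            have t1 : (repc '%' ['r', 'p'] ('%' :: 'r' :: rs1) t).take 2 = t.take 2 :=
              repc_take2 '%' 'r' 'p' rs1 t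
            have t2 : (repc '%' ['r', '?'] ('%' :: 'r' :: rs2)
                (repc '%' ['r', 'p'] ('%' :: 'r' :: rs1) t)).take 2 = t.take 2 :=
              (repc_take2 '%' 'r' '?' rs2 _).trans t1
            have t3 : (repc '%' ['r', '!'] ('%' :: 'r' :: rs3) (repc '%' ['r', '?'] ('%' :: 'r' :: rs2)
                (repc '%' ['r', 'p'] ('%' :: 'r' :: rs1) t))).take 2 = t.take 2 :=
              (repc_take2 '%' 'r' '!' rs3 _).trans t2
            rw [repc_neg '%' ['r', 'p'] _ hp1f]
            rw [repc_neg '%' ['r', '?'] _ (by rw [prefix3_congr '%' 'r' '?' c t1]; exact hp2f)]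
            rw [repc_neg '%' ['r', '!'] _ (by rw [prefix3_congr '%' 'r' '!' c t2]; exact hp3f)]
            rw [repc_neg '%' ['l', '!'] _ (by rw [prefix3_congr '%' 'l' '!' c t3]; exact hp4f)]
            have hrhs : altGo tbl (c :: t) = c :: altGo tbl t := by
              rw [altGo, hnone _
                (show String.ofList ((c :: t).take 3) ≠ "%rp" from key_ne '%' 'r' 'p' c t hp1f)
                (show String.ofList ((c :: t).take 3) ≠ "%r?" from key_ne '%' 'r' '?' c t hp2f)
                (show String.ofList ((c :: t).take 3) ≠ "%r!" from key_ne '%' 'r' '!' c t hp3f)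
                (show String.ofList ((c :: t).take 3) ≠ "%l!" from key_ne '%' 'l' '!' c t hp4f)]
            rw [hrhs, chain_eq tbl rs1 rs2 rs3 rs4 h1 h2 h3 h4 hnone c21 c31 c41 c32 c42 c43 t]
  termination_by l.length
  decreasing_by all_goals assumption


theorem tblMan_none (s : String) (n1 : s ≠ "%rp") (n2 : s ≠ "%r?") (n3 : s ≠ "%r!") (n4 : s ≠ "%l!") :
    (PySem.Dict.ofList [("%rp", "%r_palm%\n"), ("%r?", "%r_?%\n"), ("%r!", "%r_!%\n"), ("%l!", "%l_!%\n")]).get? s = none := by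
  simp [PySem.Dict.ofList, PySem.Dict.get?, PySem.Dict.empty, PySem.Dict.update,
    PySem.Dict.insert, PySem.Dict.contains, Ne.symm n1, Ne.symm n2, Ne.symm n3, Ne.symm n4]

theorem tblW_none (s : String) (n1 : s ≠ "%rp") (n2 : s ≠ "%r?") (n3 : s ≠ "%r!") (n4 : s ≠ "%l!") :
    (PySem.Dict.ofList [("%rp", "%rw_palm%\n"), ("%r?", "%rw_?%\n"), ("%r!", "%rw_!%\n"), ("%l!", "%l_!%\n")]).get? s = none := by
  simp [PySem.Dict.ofList, PySem.Dict.get?, PySem.Dict.empty, PySem.Dict.update,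
    PySem.Dict.insert, PySem.Dict.contains, Ne.symm n1, Ne.symm n2, Ne.symm n3, Ne.symm n4]


theorem ports_agree : ∀ (md_str subject_sex : String),
    replace_code_to_md md_str subject_sex = replace_code_to_md_alt md_str subject_sex := by
  intro md sex
  rw [replace_code_to_md, replace_code_to_md_alt]
  by_cases hs : sex == "man"
  · rw [if_pos hs, if_pos hs]
    simp only [List.foldl]
    rw [PySem.Str.replace, PySem.Str.replace, PySem.Str.replace, PySem.Str.replace]
    simp only [String.toList_ofList]
    congr 1
    rw [show ("%rp" : String).toList = '%' :: ['r', 'p'] from rfl,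
        show ("%r?" : String).toList = '%' :: ['r', '?'] from rfl,
        show ("%r!" : String).toList = '%' :: ['r', '!'] from rfl,
        show ("%l!" : String).toList = '%' :: ['l', '!'] from rfl,
        show ("%r_palm%\n" : String).toList = '%' :: 'r' :: ['_', 'p', 'a', 'l', 'm', '%', '\n'] from rfl,
        show ("%r_?%\n" : String).toList = '%' :: 'r' :: ['_', '?', '%', '\n'] from rfl,
        show ("%r_!%\n" : String).toList = '%' :: 'r' :: ['_', '!', '%', '\n'] from rfl,
        show ("%l_!%\n" : String).toList = '%' :: 'l' :: ['_', '!', '%', '\n'] from rfl]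
    rw [replace_eq_repc, replace_eq_repc, replace_eq_repc, replace_eq_repc]
    exact chain_eq _ ['_', 'p', 'a', 'l', 'm', '%', '\n'] ['_', '?', '%', '\n'] ['_', '!', '%', '\n'] ['_', '!', '%', '\n']
      (by decide) (by decide) (by decide) (by decide) tblMan_none
      (by unfold Clean; decide) (by unfold Clean; decide) (by unfold Clean; decide) (by unfold Clean; decide) (by unfold Clean; decide) (by unfold Clean; decide) md.toList
  · rw [if_neg hs, if_neg hs]
    simp only [List.foldl]
    rw [PySem.Str.replace, PySem.Str.replace, PySem.Str.replace, PySem.Str.replace]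
    simp only [String.toList_ofList]
    congr 1
    rw [show ("%rp" : String).toList = '%' :: ['r', 'p'] from rfl,
        show ("%r?" : String).toList = '%' :: ['r', '?'] from rfl,
        show ("%r!" : String).toList = '%' :: ['r', '!'] from rfl,
        show ("%l!" : String).toList = '%' :: ['l', '!'] from rfl,
        show ("%rw_palm%\n" : String).toList = '%' :: 'r' :: ['w', '_', 'p', 'a', 'l', 'm', '%', '\n'] from rfl,
        show ("%rw_?%\n" : String).toList = '%' :: 'r' :: ['w', '_', '?', '%', '\n'] from rfl,
        show ("%rw_!%\n" : String).toList = '%' :: 'r' :: ['w', '_', '!', '%', '\n'] from rfl,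
        show ("%l_!%\n" : String).toList = '%' :: 'l' :: ['_', '!', '%', '\n'] from rfl]
    rw [replace_eq_repc, replace_eq_repc, replace_eq_repc, replace_eq_repc]
    exact chain_eq _ ['w', '_', 'p', 'a', 'l', 'm', '%', '\n'] ['w', '_', '?', '%', '\n'] ['w', '_', '!', '%', '\n'] ['_', '!', '%', '\n']
      (by decide) (by decide) (by decide) (by decide) tblW_none
      (by unfold Clean; decide) (by unfold Clean; decide) (by unfold Clean; decide) (by unfold Clean; decide) (by unfold Clean; decide) (by unfold Clean; decide) md.toList

-- ===== VERDICT (by name: the statement is the Claim_ definition above) =====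
theorem replace_code_to_md_spec : Claim_equal_replace_code_to_md := by
  unfold Claim_equal_replace_code_to_md Spec_replace_code_to_md
  intro md_str subject_sex _
  exact ports_agree md_str subject_sex
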